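-- pv_equiv track=rewrite | github.com/rhfo0509/codingtest | icote/chap03/무지의먹방라이브.py | solution
-- ===== SOURCE A (Python) =====
-- def solution(food_times, k):
--     answer = 0
--     food_length = len(food_times)
--
--     idx = 0
--     cnt = 0
--     while k > 0:
--         # 인덱스를 1씩 증가시키다가 음식의 길이만큼 도달하면 다시 처음 음식으로 돌아간다.
--         if idx == food_length:
--             idx = idx % food_length
--         # 음식을 다 먹었다면 다음 음식을 선택하되, 모든 음식이 다 먹었는지를 확인하는 cnt 변수도 같이 1 증가한다.
--         if food_times[idx] == 0:
--             idx += 1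
--             cnt += 1
--             # 만약 모든 음식을 다 먹었다면 -1을 리턴, 아니면 continue
--             if cnt == food_length:
--                 return -1
--             else:
--                 continue
--         # 해당 인덱스에 음식을 다 먹지 않은 상태면 음식의 양을 1 감소, 인덱스 1 증가, 시간(k) 1초 감소, cnt 변수 0으로 초기화
--         food_times[idx] -= 1
--         idx += 1
--         k -= 1
--         cnt = 0
--
--     # k초 후에 지연 발생, 이 때도 음식을 다 먹은 상태인지 확인이 필요하다.
--     while True:
--         if food_times[idx % food_length] == 0:
--             idx += 1
--             cnt += 1
--             # 만약 모든 음식을 다 먹었다면 -1을 리턴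
--             if cnt == food_length:
--                 return -1
--         else:
--             idx = idx % food_length
--             break
--
--     answer = idx + 1
--     return answer
-- ===== SOURCE B (Python) =====
-- def solution(food_times, k):
--     # Bulk simulation: consume whole rounds at once (min remaining amount or
--     # k // active-count rounds per step) instead of one second at a time.
--     # Does not mutate food_times (A empties it in place).
--     if k < 0:
--         k = 0
--     ft = list(food_times)
--     while True:
--         act = [i for i, v in enumerate(ft) if v != 0]
--         a = len(act)
--         if a == 0:
--             return -1
--         if k < a:
--             return act[k] + 1
--         pos = [v for v in ft if v > 0]
--         m = k // a if not pos else min(min(pos), k // a)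
--         ft = [v - m if v != 0 else v for v in ft]
--         k -= m * a
-- ===== Notes on version B (the rewrite author's own statement) =====
-- stated objective: alternative
-- what changed: Replaces A's one-second-at-a-time cyclic pointer simulation (idx/cnt state machine, in-place decrements) by bulk consumption: each iteration of B removes min(smallest remaining portion, k // active-count) whole rounds at once and indexes the answer directly in the list of active foods.
import Mathlib
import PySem

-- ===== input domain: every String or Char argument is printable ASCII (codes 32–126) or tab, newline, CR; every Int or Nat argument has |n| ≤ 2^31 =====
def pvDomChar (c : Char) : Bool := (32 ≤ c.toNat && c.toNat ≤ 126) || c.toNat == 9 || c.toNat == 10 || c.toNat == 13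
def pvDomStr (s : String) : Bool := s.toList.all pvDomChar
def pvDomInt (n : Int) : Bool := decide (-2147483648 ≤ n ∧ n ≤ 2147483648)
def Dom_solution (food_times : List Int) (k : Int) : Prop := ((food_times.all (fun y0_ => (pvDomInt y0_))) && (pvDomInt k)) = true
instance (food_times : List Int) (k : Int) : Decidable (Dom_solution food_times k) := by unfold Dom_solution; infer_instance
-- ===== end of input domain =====

-- B replaces A's one-second-at-a-time pointer simulation by bulk consumption of whole
-- rounds (min remaining portion, or k // active-count, rounds per step).
-- Note: A empties `food_times` in place; B does not mutate it — the equivalence proved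
-- here is about the RETURN value only.

-- ===== PORT A =====
-- Second `while True` loop of A: scan (cyclically) from idx for the first uneaten food.
-- `fuel` only makes the recursion structural; fuel = n suffices from every state A reaches
-- (proved below); list access is List.getD since idx % n < n is always in range for n ≥ 1 (Pre_).
def pvLoop2 (n : Nat) (food : List Int) : Nat → Nat → Nat → Int
  | 0, _, _ => 0
  | fuel + 1, idx, cnt =>
    if food.getD (idx % n) 0 = 0 then
      if cnt + 1 = n then -1 else pvLoop2 n food fuel (idx + 1) (cnt + 1)
    else ((idx % n : Nat) : Int) + 1

-- First `while k > 0` loop of A; on exit it falls through to the second loop.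
-- `fuel` only makes the recursion structural; the initial fuel chosen in `solution`
-- is enough for every reachable state (proved below).
def pvLoop1 (n : Nat) : Nat → List Int → Int → Nat → Nat → Int
  | 0, _, _, _, _ => 0
  | fuel + 1, food, k, idx, cnt =>
    if 0 < k then
      let idx1 := if idx = n then idx % n else idx
      let v := food.getD idx1 0
      if v = 0 then
        if cnt + 1 = n then -1 else pvLoop1 n fuel food k (idx1 + 1) (cnt + 1)
      else
        pvLoop1 n fuel (food.set idx1 (v - 1)) (k - 1) (idx1 + 1) 0
    else
      pvLoop2 n food n idx cnt

def solution (food_times : List Int) (k : Int) : Int :=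
  let n := food_times.length
  pvLoop1 n (k.toNat * (n + 1) + n + 1) food_times k 0 0

-- ===== PORT B =====
-- B-side helpers: the three comprehensions of Source B
-- act = [i for i, v in enumerate(ft) if v != 0]
def pvActB (ft : List Int) : List Int :=
  (PySem.List.enumerate ft 0).filterMap (fun p => if p.2 ≠ 0 then some p.1 else none)
-- pos = [v for v in ft if v > 0]
def pvPos (ft : List Int) : List Int := ft.filter (fun v => decide (0 < v))
-- [v - m if v != 0 else v for v in ft]
def pvEat (m : Int) (ft : List Int) : List Int := ft.map (fun v => if v ≠ 0 then v - m else v)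

-- termination helper for pvBLoop, cited in its decreasing_by
theorem pvB_dec {k a : Int} (pos : List Int) (hpos : ∀ v ∈ pos, 0 < v) (ha : 1 ≤ a)
    (hk : ¬ k < a) :
    (k - (if pos = [] then PySem.Int.floordiv k a else
      min ((PySem.List.min? pos (fun v => v)).getD 0) (PySem.Int.floordiv k a)) * a).toNat
    < k.toNat := by
  have h1 : 1 ≤ PySem.Int.floordiv k a := by
    rw [(PySem.Int.le_floordiv_iff_mul_le (by omega))]; omega
  have h2 : PySem.Int.floordiv k a * a ≤ k :=
    (PySem.Int.le_floordiv_iff_mul_le (a := k) (b := a) (q := PySem.Int.floordiv k a)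
      (by omega)).mp le_rfl
  set m : Int := (if pos = [] then PySem.Int.floordiv k a else
      min ((PySem.List.min? pos (fun v => v)).getD 0) (PySem.Int.floordiv k a)) with hm
  have hm1 : 1 ≤ m := by
    by_cases hp : pos = []
    · simp [hm, hp, h1]
    · cases hmin : PySem.List.min? pos (fun v => v) with
      | none => exact absurd ((PySem.List.min?_eq_none_iff _ _).mp hmin) hp
      | some x =>
        have hxpos := hpos x (PySem.List.min?_mem hmin)
        simp only [hm, hp, if_false, hmin, Option.getD_some]
        exact le_min (by omega) h1
  have hmle : m ≤ PySem.Int.floordiv k a := by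
    by_cases hp : pos = [] <;> simp [hm, hp]
  have hma : m * a ≤ k := le_trans (by nlinarith) h2
  have hama : a ≤ m * a := le_mul_of_one_le_left (by omega) hm1
  omega

-- the `while True` loop of Source B
def pvBLoop (ft : List Int) (k : Int) : Int :=
  let act := pvActB ft
  let a : Int := (act.length : Int)
  if a = 0 then -1
  else if k < a then (PySem.List.pyGet? act k).getD 0 + 1
  else
    let pos := pvPos ft
    let m : Int := if pos = [] then PySem.Int.floordiv k a
                   else min ((PySem.List.min? pos (fun v => v)).getD 0) (PySem.Int.floordiv k a)
    pvBLoop (pvEat m ft) (k - m * a)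
termination_by k.toNat
decreasing_by
  simp only [dite_eq_ite]
  rename_i h0 hk
  refine pvB_dec (pvPos ft) (fun v hv => ?_) ?_ ?_
  · unfold pvPos at hv
    have := List.of_mem_filter hv
    simpa using this
  · have h0' : ¬ ((pvActB ft).length : Int) = 0 := h0
    omega
  · exact hk

def solution_alt (food_times : List Int) (k : Int) : Int :=
  let k1 := if k < 0 then 0 else k
  pvBLoop food_times k1

-- ===== PRECONDITION & SPEC =====
-- Pre_ excludes only the empty list, on which A raises ZeroDivisionError (idx % food_length with food_length = 0).
def Pre_solution (food_times : List Int) (k : Int) : Prop := food_times ≠ []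
instance (food_times : List Int) (k : Int) : Decidable (Pre_solution food_times k) := by
  unfold Pre_solution; infer_instance
def pvWitness_solution : List Int × Int := ([3, 1, 2], 5)

def Spec_solution (food_times : List Int) (k : Int) (out : Int) : Prop := out = solution_alt food_times k
instance (food_times : List Int) (k : Int) (out : Int) : Decidable (Spec_solution food_times k out) := by unfold Spec_solution; infer_instance

-- ===== CLAIM (what is proved, stated in full; the proofs are below) =====
def Claim_equal_solution : Prop := ∀ (food_times : List Int) (k : Int), Dom_solution food_times k → Pre_solution food_times k → Spec_solution food_times k (solution food_times k)

-- ===== LEMMAS AND PROOFS =====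

-- offset (from p, cyclically) of the first uneaten food, if any
def pvFaT (food : List Int) (p : Nat) : Option Nat :=
  (List.range food.length).find? (fun t => decide (food.getD ((p + t) % food.length) 0 ≠ 0))

-- reference process: jump to the first uneaten food, eat one portion, advance; k seconds
def pvRef : Nat → List Int → Nat → Int
  | 0, food, p =>
    match pvFaT food p with
    | none => -1
    | some t => (((p + t) % food.length : Nat) : Int) + 1
  | k + 1, food, p =>
    match pvFaT food p with
    | none => -1
    | some t =>
      let q := (p + t) % food.length
      pvRef k (food.set q (food.getD q 0 - 1)) (q + 1)

-- the still-uneaten positions in [p, n), in increasing order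
def pvActFrom (food : List Int) (p : Nat) : List Nat :=
  (List.range' p (food.length - p)).filter (fun i => decide (food.getD i 0 ≠ 0))

theorem pvFaT_lt {food : List Int} {p t : Nat} (h : pvFaT food p = some t) :
    t < food.length := by
  have := List.mem_of_find?_eq_some h
  simpa using this

theorem pvFaT_spec_some {food : List Int} {p t : Nat} (h : pvFaT food p = some t) :
    food.getD ((p + t) % food.length) 0 ≠ 0 := by
  have := List.find?_some h
  simpa using this

theorem pvFaT_mod (food : List Int) (p : Nat) :
    pvFaT food p = pvFaT food (p % food.length) := by
  unfold pvFaT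
  congr 1
  funext t
  rw [Nat.mod_add_mod]

theorem pvFaT_active {food : List Int} {p : Nat} (h0 : 0 < food.length)
    (h : food.getD (p % food.length) 0 ≠ 0) : pvFaT food p = some 0 := by
  obtain ⟨m, hm⟩ := Nat.exists_eq_succ_of_ne_zero (Nat.pos_iff_ne_zero.mp h0)
  unfold pvFaT
  rw [List.getD_eq_getElem?_getD] at h
  rw [hm] at h ⊢
  rw [List.range_succ_eq_map, List.find?_cons]
  simp [h]

theorem pvFaT_skip {food : List Int} {p : Nat} (h0 : 0 < food.length)
    (h : food.getD (p % food.length) 0 = 0) :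
    pvFaT food p = (pvFaT food (p + 1)).map (· + 1) := by
  obtain ⟨m, hm⟩ := Nat.exists_eq_succ_of_ne_zero (Nat.pos_iff_ne_zero.mp h0)
  unfold pvFaT
  rw [List.getD_eq_getElem?_getD] at h
  rw [hm] at h ⊢
  conv_lhs => rw [List.range_succ_eq_map]
  conv_rhs => rw [List.range_succ]
  rw [List.find?_cons, List.find?_append]
  have hlast : List.find? (fun t => decide (food.getD ((p + 1 + t) % (m+1)) 0 ≠ 0)) [m] = none := by
    simp only [List.find?_singleton]
    have he : p + 1 + m = p + (m + 1) := by omega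
    simp [List.getD_eq_getElem?_getD, he, Nat.add_mod_right, h]
  rw [hlast, Option.or_none]
  have hh : (decide (food.getD ((p + 0) % (m+1)) 0 ≠ 0)) = false := by
    simp [List.getD_eq_getElem?_getD, h]
  rw [hh]
  show List.find? (fun t => decide (food.getD ((p + t) % (m+1)) 0 ≠ 0)) (List.map Nat.succ (List.range m))
      = Option.map (fun x => x + 1) (List.find? (fun t => decide (food.getD ((p + 1 + t) % (m+1)) 0 ≠ 0)) (List.range m))
  rw [List.find?_map]
  have hfun : ((fun t => decide (food.getD ((p + t) % (m + 1)) 0 ≠ 0)) ∘ Nat.succ)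
      = (fun t => decide (food.getD ((p + 1 + t) % (m + 1)) 0 ≠ 0)) := by
    funext t
    have he : p + Nat.succ t = p + 1 + t := by omega
    simp only [Function.comp_apply, he]
  rw [hfun]

theorem pvFaT_all_zero {food : List Int} (h : ∀ i < food.length, food.getD i 0 = 0)
    (p : Nat) : pvFaT food p = none := by
  apply List.find?_eq_none.mpr
  intro t ht
  have ht' : t < food.length := by simpa using ht
  have h2 := h ((p + t) % food.length) (Nat.mod_lt _ (Nat.lt_of_le_of_lt (Nat.zero_le _) ht'))
  rw [List.getD_eq_getElem?_getD] at h2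
  simp [h2]

theorem pvRef_mod (k : Nat) (food : List Int) (p : Nat) :
    pvRef k food p = pvRef k food (p % food.length) := by
  cases k <;>
    (simp only [pvRef]
     rw [pvFaT_mod food p]
     cases h : pvFaT food (p % food.length) <;> simp [Nat.mod_add_mod])

theorem pvRef_skip {food : List Int} {p : Nat} (k : Nat) (h0 : 0 < food.length)
    (h : food.getD (p % food.length) 0 = 0) :
    pvRef k food (p + 1) = pvRef k food p := by
  cases k <;>
    (simp only [pvRef]
     rw [pvFaT_skip h0 h]
     cases hf : pvFaT food (p + 1) with
     | none => simp
     | some t =>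
       have ht : p + 1 + t = p + (t + 1) := by omega
       simp only [Option.map_some]
       rw [ht])

theorem pvActFrom_stop {food : List Int} {p : Nat} (h : food.length ≤ p) :
    pvActFrom food p = [] := by
  unfold pvActFrom
  rw [Nat.sub_eq_zero_of_le h]
  rfl

theorem pvActFrom_cons {food : List Int} {p : Nat} (h : p < food.length)
    (hv : food.getD p 0 ≠ 0) : pvActFrom food p = p :: pvActFrom food (p + 1) := by
  unfold pvActFrom
  have hs : food.length - p = (food.length - (p + 1)) + 1 := by omega
  rw [hs, List.range'_succ, List.filter_cons]
  rw [List.getD_eq_getElem?_getD] at hv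
  simp [hv]

theorem pvActFrom_skip {food : List Int} {p : Nat} (h : p < food.length)
    (hv : food.getD p 0 = 0) : pvActFrom food p = pvActFrom food (p + 1) := by
  unfold pvActFrom
  have hs : food.length - p = (food.length - (p + 1)) + 1 := by omega
  rw [hs, List.range'_succ, List.filter_cons]
  rw [List.getD_eq_getElem?_getD] at hv
  simp [hv]

theorem pv_getD_set_ne {food : List Int} {p i : Nat} {x : Int} (h : i ≠ p) :
    (food.set p x).getD i 0 = food.getD i 0 := by
  simp [List.getD_eq_getElem?_getD, List.getElem?_set_ne (h := h.symm)]

theorem pvActFrom_set {food : List Int} {p : Nat} (x : Int) :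
    pvActFrom (food.set p x) (p + 1) = pvActFrom food (p + 1) := by
  unfold pvActFrom
  rw [List.length_set]
  apply List.filter_congr
  intro i hi
  have : p + 1 ≤ i := (List.mem_range'_1.mp hi).1
  rw [pv_getD_set_ne (by omega)]

-- R1: if fewer seconds than uneaten foods remain, the answer is the k-th of them
theorem pvR1 (d : Nat) : ∀ (food : List Int) (p k : Nat), food.length - p ≤ d →
    p ≤ food.length → k < (pvActFrom food p).length →
    pvRef k food p = (((pvActFrom food p).getD k 0 : Nat) : Int) + 1 := by
  induction d with
  | zero =>
    intro food p k hd hp hk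
    have : food.length = p := by omega
    rw [pvActFrom_stop (by omega)] at hk
    simp at hk
  | succ d ih =>
    intro food p k hd hp hk
    rcases Nat.lt_or_ge p food.length with hlt | hge
    · have hpmod : p % food.length = p := Nat.mod_eq_of_lt hlt
      by_cases hv : food.getD p 0 = 0
      · rw [pvActFrom_skip hlt hv] at hk ⊢
        rw [← pvRef_skip k (by omega) (by rwa [hpmod])]
        exact ih food (p + 1) k (by omega) (by omega) hk
      · rw [pvActFrom_cons hlt hv] at hk ⊢
        have hfa : pvFaT food p = some 0 := pvFaT_active (by omega) (by rwa [hpmod])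
        cases k with
        | zero =>
          simp only [pvRef, hfa]
          simp [hpmod]
        | succ k' =>
          simp only [pvRef, hfa]
          have hq : (p + 0) % food.length = p := by simpa using hpmod
          rw [hq]
          have hlen : (food.set p (food.getD p 0 - 1)).length = food.length := by simp
          have := ih (food.set p (food.getD p 0 - 1)) (p + 1) k'
            (by rw [hlen]; omega) (by rw [hlen]; omega)
            (by rw [pvActFrom_set]; simpa using hk)
          rw [pvActFrom_set] at this
          rw [this]
          simp
    · rw [pvActFrom_stop (by omega)] at hk
      simp at hk

def pvDecFrom (food : List Int) (p : Nat) : List Int :=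
  food.mapIdx (fun i v => if p ≤ i ∧ v ≠ 0 then v - 1 else v)

theorem pvDecFrom_stop (food : List Int) : pvDecFrom food food.length = food := by
  apply List.ext_getElem (by simp [pvDecFrom])
  intro i h1 h2
  simp only [pvDecFrom, List.getElem_mapIdx]
  have : ¬ food.length ≤ i := by simp at h2; omega
  simp [this]

theorem pvDecFrom_skip {food : List Int} {p : Nat} (h : p < food.length)
    (hv : food.getD p 0 = 0) : pvDecFrom food p = pvDecFrom food (p + 1) := by
  apply List.ext_getElem (by simp [pvDecFrom])
  intro i h1 h2
  simp only [pvDecFrom, List.getElem_mapIdx]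
  rcases Nat.lt_trichotomy i p with hip | hip | hip
  · have n1 : ¬ p ≤ i := by omega
    have n2 : ¬ p + 1 ≤ i := by omega
    simp [n1, n2]
  · subst hip
    have hz : food[i] = 0 := by
      rw [List.getD_eq_getElem?_getD] at hv
      simp only [pvDecFrom, List.length_mapIdx] at h1
      rw [List.getElem?_eq_getElem h1] at hv
      simpa using hv
    have n2 : ¬ i + 1 ≤ i := by omega
    simp [hz, n2]
  · have y1 : p ≤ i := by omega
    have y2 : p + 1 ≤ i := by omega
    simp [y1, y2]

theorem pvDecFrom_set {food : List Int} {p : Nat} (h : p < food.length)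
    (hv : food.getD p 0 ≠ 0) :
    pvDecFrom (food.set p (food.getD p 0 - 1)) (p + 1) = pvDecFrom food p := by
  apply List.ext_getElem (by simp [pvDecFrom])
  intro i h1 h2
  simp only [pvDecFrom, List.getElem_mapIdx, List.getElem_set]
  have hg : food.getD p 0 = food[p] := by
    rw [List.getD_eq_getElem?_getD, List.getElem?_eq_getElem h]
    simp
  rcases Nat.lt_trichotomy i p with hip | hip | hip
  · have n1 : ¬ p ≤ i := by omega
    have n2 : ¬ p + 1 ≤ i := by omega
    have ne : p ≠ i := by omega
    simp [n1, n2, ne]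
  · subst hip
    have n2 : ¬ i + 1 ≤ i := by omega
    have hvz : food[i] ≠ 0 := by rw [← hg]; exact hv
    simp [n2, hvz, List.getElem?_eq_getElem h]
  · have y1 : p ≤ i := by omega
    have y2 : p + 1 ≤ i := by omega
    have ne : p ≠ i := by omega
    simp [y1, y2, ne]

-- R2: a partial round from p: eat every uneaten food in [p, n) once, then restart at 0
theorem pvR2 (d : Nat) : ∀ (food : List Int) (p : Nat) (k : Nat), food.length - p ≤ d →
    p ≤ food.length → (pvActFrom food p).length ≤ k →
    pvRef k food p = pvRef (k - (pvActFrom food p).length) (pvDecFrom food p) 0 := by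
  induction d with
  | zero =>
    intro food p k hd hp hk
    have hple : food.length ≤ p := by omega
    have hpe : p = food.length := by omega
    rw [pvActFrom_stop hple]
    subst hpe
    rw [pvDecFrom_stop]
    simp only [List.length_nil, Nat.sub_zero]
    conv_rhs => rw [show (0 : Nat) = food.length % food.length by simp]
    exact pvRef_mod k food food.length
  | succ d ih =>
    intro food p k hd hp hk
    rcases Nat.lt_or_ge p food.length with hlt | hge
    · have hpmod : p % food.length = p := Nat.mod_eq_of_lt hlt
      by_cases hv : food.getD p 0 = 0
      · rw [pvActFrom_skip hlt hv, pvDecFrom_skip hlt hv]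
        rw [← pvRef_skip k (by omega) (by rwa [hpmod])]
        exact ih food (p + 1) k (by omega) (by omega) (by rwa [pvActFrom_skip hlt hv] at hk)
      · rw [pvActFrom_cons hlt hv] at hk ⊢
        have hfa : pvFaT food p = some 0 := pvFaT_active (by omega) (by rwa [hpmod])
        have hk1 : 1 ≤ k := by simp at hk; omega
        obtain ⟨k', rfl⟩ : ∃ k'', k = k'' + 1 := ⟨k - 1, by omega⟩
        simp only [pvRef, hfa]
        have hq : (p + 0) % food.length = p := by simpa using hpmod
        rw [hq]
        have hlen : (food.set p (food.getD p 0 - 1)).length = food.length := by simp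
        have := ih (food.set p (food.getD p 0 - 1)) (p + 1) k'
          (by rw [hlen]; omega) (by rw [hlen]; omega)
          (by rw [pvActFrom_set]; simp at hk ⊢; omega)
        rw [pvActFrom_set, pvDecFrom_set hlt hv] at this
        rw [this]
        simp only [List.length_cons]
        congr 1
        omega
    · have hpe : p = food.length := by omega
      rw [pvActFrom_stop hge]
      subst hpe
      rw [pvDecFrom_stop]
      simp only [List.length_nil, Nat.sub_zero]
      conv_rhs => rw [show (0 : Nat) = food.length % food.length by simp]
      exact pvRef_mod k food food.length

def pvDecBy (m : Nat) (food : List Int) : List Int :=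
  food.map (fun v => if v ≠ 0 then v - (m : Int) else v)

theorem pvDecBy_zero (food : List Int) : pvDecBy 0 food = food := by
  simp [pvDecBy]

theorem pvDecFrom_zero (food : List Int) : pvDecFrom food 0 = pvDecBy 1 food := by
  apply List.ext_getElem (by simp [pvDecFrom, pvDecBy])
  intro i h1 h2
  simp [pvDecFrom, pvDecBy, List.getElem_mapIdx]

theorem pvDecBy_comp (food : List Int) (m : Nat) (hm : 1 ≤ m)
    (hyp : ∀ v ∈ food, v < 0 ∨ v = 0 ∨ ((m : Int) + 1) ≤ v) :
    pvDecBy m (pvDecBy 1 food) = pvDecBy (m + 1) food := by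
  unfold pvDecBy
  rw [List.map_map]
  apply List.map_congr_left
  intro v hv
  simp only [Function.comp_apply]
  rcases hyp v hv with h | h | h
  · have h1 : v ≠ 0 := by omega
    have h2 : v - (1:Nat) ≠ 0 := by push_cast; omega
    simp only [if_pos h1, if_pos h2]
    push_cast
    ring
  · subst h
    simp
  · have h1 : v ≠ 0 := by omega
    have hm' : (1 : Int) ≤ (m : Int) := by exact_mod_cast hm
    have h2 : v - (1:Nat) ≠ 0 := by push_cast; omega
    simp only [if_pos h1, if_pos h2]
    push_cast
    ring


theorem pvActFrom_decBy1 (food : List Int) (m : Nat) (hm : 1 ≤ m)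
    (hyp : ∀ v ∈ food, v < 0 ∨ v = 0 ∨ ((m : Int) + 1) ≤ v) :
    pvActFrom (pvDecBy 1 food) 0 = pvActFrom food 0 := by
  unfold pvActFrom
  have hlen : (pvDecBy 1 food).length = food.length := by simp [pvDecBy]
  rw [hlen]
  apply List.filter_congr
  intro i hi
  have hin : i < food.length := by
    have := List.mem_range'_1.mp hi
    omega
  have hg2 : food.getD i 0 = food[i] := by
    rw [List.getD_eq_getElem?_getD, List.getElem?_eq_getElem hin]; simp
  have hg1 : (pvDecBy 1 food).getD i 0 = (if food[i] ≠ 0 then food[i] - (1:Int) else food[i]) := by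
    rw [List.getD_eq_getElem?_getD, List.getElem?_eq_getElem (by rw [hlen]; exact hin)]
    simp [pvDecBy]
  rw [hg1, hg2]
  have hm' : (1 : Int) ≤ (m : Int) := by exact_mod_cast hm
  rcases hyp food[i] (List.getElem_mem hin) with h | h | h
  · have h1 : food[i] ≠ 0 := by omega
    have h2 : food[i] - 1 ≠ 0 := by omega
    simp [h1, h2]
  · simp [h]
  · have h1 : food[i] ≠ 0 := by omega
    have h2 : food[i] - 1 ≠ 0 := by omega
    simp [h1, h2]

-- MR: m whole rounds at once, valid while every uneaten food survives them
theorem pvMR (m : Nat) : ∀ (food : List Int) (k : Nat), 0 < food.length →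
    (∀ v ∈ food, v < 0 ∨ v = 0 ∨ (m : Int) ≤ v) →
    m * (pvActFrom food 0).length ≤ k →
    pvRef k food 0 = pvRef (k - m * (pvActFrom food 0).length) (pvDecBy m food) 0 := by
  induction m with
  | zero =>
    intro food k h0 hyp hk
    rw [pvDecBy_zero]
    simp
  | succ m ih =>
    intro food k h0 hyp hk
    have hL1 : (pvActFrom food 0).length ≤ k := by
      have : (pvActFrom food 0).length ≤ (m + 1) * (pvActFrom food 0).length :=
        Nat.le_mul_of_pos_left _ (by omega)
      omega
    have step1 := pvR2 food.length food 0 k (by omega) (by omega) hL1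
    rw [pvDecFrom_zero] at step1
    rw [step1]
    cases m with
    | zero =>
      norm_num
    | succ m' =>
      have hyp' : ∀ v ∈ pvDecBy 1 food, v < 0 ∨ v = 0 ∨ ((m' + 1 : Nat) : Int) ≤ v := by
        intro v hv
        obtain ⟨w, hw, rfl⟩ := List.mem_map.mp hv
        rcases hyp w hw with h | h | h
        · left
          have h1 : w ≠ 0 := by omega
          simp [h1]
          omega
        · subst h; simp
        · have h1 : w ≠ 0 := by
            have : ((m' + 1 + 1 : Nat) : Int) ≤ w := h
            push_cast at this ⊢
            omega
          simp [h1]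
          right; right
          have : ((m' + 1 + 1 : Nat) : Int) ≤ w := h
          push_cast at this ⊢
          omega
      have hyp2 : ∀ v ∈ food, v < 0 ∨ v = 0 ∨ ((m' + 1 : Nat) : Int) + 1 ≤ v := by
        intro v hv
        rcases hyp v hv with h | h | h
        · left; exact h
        · right; left; exact h
        · right; right
          have : ((m' + 1 + 1 : Nat) : Int) ≤ v := h
          push_cast at this ⊢
          omega
      have hact : pvActFrom (pvDecBy 1 food) 0 = pvActFrom food 0 :=
        pvActFrom_decBy1 food (m' + 1) (by omega) hyp2
      have hlen1 : (pvDecBy 1 food).length = food.length := by simp [pvDecBy]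
      have hrec := ih (pvDecBy 1 food) (k - (pvActFrom food 0).length)
        (by rw [hlen1]; exact h0)
        hyp'
        (by rw [hact]
            have hx : (m' + 1 + 1) * (pvActFrom food 0).length ≤ k := hk
            rw [Nat.succ_mul] at hx
            omega)
      rw [hact] at hrec
      rw [hrec]
      rw [pvDecBy_comp food (m' + 1) (by omega) hyp2]
      congr 1
      have hx : (m' + 1 + 1) * (pvActFrom food 0).length ≤ k := hk
      rw [Nat.succ_mul (m' + 1)] at hx ⊢
      omega

theorem pvActB_gen (l : List Int) : ∀ (s : Nat),
    (PySem.List.enumerate l (s : Int)).filterMap (fun p => if p.2 ≠ 0 then some p.1 else none)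
    = ((List.range' s l.length).filter (fun i => decide (l.getD (i - s) 0 ≠ 0))).map (fun i => Int.ofNat i) := by
  induction l with
  | nil => intro s; simp [PySem.List.enumerate_nil]
  | cons x t ih =>
    intro s
    rw [PySem.List.enumerate_cons, List.filterMap_cons]
    have htail : (List.range' (s+1) t.length).filter (fun i => decide ((x::t).getD (i - s) 0 ≠ 0))
        = (List.range' (s+1) t.length).filter (fun i => decide (t.getD (i - (s+1)) 0 ≠ 0)) := by
      apply List.filter_congr
      intro i hi
      have his : s + 1 ≤ i := (List.mem_range'_1.mp hi).1
      have hstep : i - s = (i - (s+1)) + 1 := by omega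
      rw [hstep, List.getD_cons_succ]
    have hcast : ((s:Int) + 1) = ((s+1 : Nat) : Int) := by push_cast; ring
    rw [hcast, ih (s+1)]
    rw [List.length_cons, List.range'_succ, List.filter_cons]
    by_cases hx : x = 0
    · rw [← htail]
      simp [hx]
    · rw [← htail]
      simp [hx]

theorem pvActB_eq (food : List Int) :
    pvActB food = (pvActFrom food 0).map (fun i => Int.ofNat i) := by
  have h := pvActB_gen food 0
  simpa [pvActB, pvActFrom] using h

theorem pvB_m_facts {k a : Int} (pos : List Int) (hpos : ∀ v ∈ pos, 0 < v) (ha : 1 ≤ a)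
    (hk : ¬ k < a) :
    1 ≤ (if pos = [] then PySem.Int.floordiv k a else
          min ((PySem.List.min? pos (fun v => v)).getD 0) (PySem.Int.floordiv k a)) ∧
    (if pos = [] then PySem.Int.floordiv k a else
          min ((PySem.List.min? pos (fun v => v)).getD 0) (PySem.Int.floordiv k a)) * a ≤ k ∧
    (∀ x ∈ pos,
      (if pos = [] then PySem.Int.floordiv k a else
          min ((PySem.List.min? pos (fun v => v)).getD 0) (PySem.Int.floordiv k a)) ≤ x) := by
  have h1 : 1 ≤ PySem.Int.floordiv k a := by
    rw [(PySem.Int.le_floordiv_iff_mul_le (by omega))]; omega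
  have h2 : PySem.Int.floordiv k a * a ≤ k :=
    (PySem.Int.le_floordiv_iff_mul_le (a := k) (b := a) (q := PySem.Int.floordiv k a)
      (by omega)).mp le_rfl
  set m : Int := (if pos = [] then PySem.Int.floordiv k a else
      min ((PySem.List.min? pos (fun v => v)).getD 0) (PySem.Int.floordiv k a)) with hm
  have hm1 : 1 ≤ m := by
    by_cases hp : pos = []
    · simp [hm, hp, h1]
    · cases hmin : PySem.List.min? pos (fun v => v) with
      | none => exact absurd ((PySem.List.min?_eq_none_iff _ _).mp hmin) hp
      | some x =>
        have hxpos := hpos x (PySem.List.min?_mem hmin)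
        simp only [hm, hp, if_false, hmin, Option.getD_some]
        exact le_min (by omega) h1
  have hmle : m ≤ PySem.Int.floordiv k a := by
    by_cases hp : pos = [] <;> simp [hm, hp]
  refine ⟨hm1, le_trans (by nlinarith) h2, ?_⟩
  intro x hxmem
  have hp : pos ≠ [] := by intro hc; rw [hc] at hxmem; simp at hxmem
  cases hmin : PySem.List.min? pos (fun v => v) with
  | none => exact absurd ((PySem.List.min?_eq_none_iff _ _).mp hmin) hp
  | some y =>
    have := PySem.List.min?_isMin hmin x hxmem
    simp only [hm, hp, if_false, hmin, Option.getD_some]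
    calc min y (PySem.Int.floordiv k a) ≤ y := min_le_left _ _
    _ ≤ x := this

-- BM: B's bulk loop equals the reference process
theorem pvBM (K : Nat) : ∀ (food : List Int) (k : Int), k.toNat < K → 0 ≤ k →
    0 < food.length → pvBLoop food k = pvRef k.toNat food 0 := by
  induction K with
  | zero => intro food k hK _ _; exact absurd hK (Nat.not_lt_zero _)
  | succ K ih =>
    intro food k hK hk0 hlen
    rw [pvBLoop]
    rw [pvActB_eq food]
    rw [List.length_map]
    set L := pvActFrom food 0 with hL
    by_cases hA : ((L.length : Int)) = 0
    · rw [if_pos hA]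
      have hnil : L = [] := List.eq_nil_of_length_eq_zero (by omega)
      have hall : ∀ i < food.length, food.getD i 0 = 0 := by
        intro i hi
        by_contra hnz
        have hmem : i ∈ L := by
          rw [hL]
          unfold pvActFrom
          rw [List.mem_filter]
          refine ⟨List.mem_range'_1.mpr ⟨Nat.zero_le _, by omega⟩, by simpa using hnz⟩
        rw [hnil] at hmem
        simp at hmem
      have hfa : pvFaT food 0 = none := pvFaT_all_zero hall 0
      cases hkn : k.toNat <;> simp [pvRef, hfa]
    · rw [if_neg hA]
      by_cases hkA : k < (L.length : Int)
      · rw [if_pos hkA]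
        have hkn : k.toNat < L.length := by omega
        have hR1 := pvR1 food.length food 0 k.toNat (by omega) (Nat.zero_le _)
          (by rw [← hL]; exact hkn)
        rw [← hL] at hR1
        rw [hR1]
        rw [PySem.List.pyGet?_of_nonneg _ hk0]
        rw [List.getElem?_map, List.getElem?_eq_getElem hkn]
        have : L.getD k.toNat 0 = L[k.toNat] := by
          rw [List.getD_eq_getElem?_getD, List.getElem?_eq_getElem hkn]; simp
        rw [this]
        simp
      · rw [if_neg hkA]
        have hfacts := pvB_m_facts (pvPos food)
          (fun v hv => by
            have := List.of_mem_filter (by exact hv : v ∈ List.filter _ food)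
            simpa using this)
          (by omega) hkA
        set m : Int := (if pvPos food = [] then PySem.Int.floordiv k (L.length : Int) else
            min ((PySem.List.min? (pvPos food) (fun v => v)).getD 0)
              (PySem.Int.floordiv k (L.length : Int))) with hm
        obtain ⟨hm1, hma, hmmin⟩ := hfacts
        have hmN : ((m.toNat : Int)) = m := by omega
        have hyp : ∀ v ∈ food, v < 0 ∨ v = 0 ∨ ((m.toNat : Int)) ≤ v := by
          intro v hv
          rcases lt_trichotomy v 0 with h | h | h
          · left; exact h
          · right; left; exact h
          · right; right
            rw [hmN]
            exact hmmin v (by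
              unfold pvPos
              rw [List.mem_filter]
              exact ⟨hv, by simpa using h⟩)
        have hEat : pvEat m food = pvDecBy m.toNat food := by
          unfold pvEat pvDecBy
          rw [hmN]
        have hP : ((m.toNat * L.length : Nat) : Int) = m * (L.length : Int) := by
          push_cast
          rw [hmN]
        have hMR := pvMR m.toNat food k.toNat hlen hyp
          (by
            have : ((m.toNat * L.length : Nat) : Int) ≤ k := by rw [hP]; exact hma
            rw [← hL]
            omega)
        rw [← hL] at hMR
        have hlen2 : 0 < (pvEat m food).length := by
          unfold pvEat; rw [List.length_map]; exact hlen
        have harg : (k - m * (L.length : Int)).toNat = k.toNat - m.toNat * L.length := by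
          omega
        have hdec : (k - m * (L.length : Int)).toNat < K := by
          have h1' : 1 ≤ (L.length : Int) := by omega
          have : (L.length : Int) ≤ m * (L.length : Int) :=
            le_mul_of_one_le_left (by omega) hm1
          omega
        have hrec := ih (pvEat m food) (k - m * (L.length : Int)) hdec (by omega) hlen2
        rw [hrec, hEat, harg]
        exact (hMR).symm

-- L2: A's second loop returns the first uneaten food from idx (cyclically), or -1
theorem pvL2 (food : List Int) (n : Nat) (hn : n = food.length) (h0 : 0 < n) :
    ∀ (fuel idx cnt : Nat),
    (match pvFaT food idx with
     | some t => cnt + t < n ∧ t < fuel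
     | none => cnt < n ∧ n - cnt ≤ fuel) →
    pvLoop2 n food fuel idx cnt =
      (match pvFaT food idx with
       | none => -1
       | some t => (((idx + t) % n : Nat) : Int) + 1) := by
  subst hn
  intro fuel
  induction fuel with
  | zero =>
    intro idx cnt hinv
    cases hf : pvFaT food idx with
    | some t => rw [hf] at hinv; omega
    | none => rw [hf] at hinv; omega
  | succ fuel ih =>
    intro idx cnt hinv
    unfold pvLoop2
    by_cases hz : food.getD (idx % food.length) 0 = 0
    · rw [if_pos hz]
      have hskip : pvFaT food idx = (pvFaT food (idx + 1)).map (· + 1) :=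
        pvFaT_skip (by omega) hz
      by_cases hc : cnt + 1 = food.length
      · rw [if_pos hc]
        cases hf : pvFaT food idx with
        | none => simp
        | some t =>
          rw [hf] at hinv
          have ht1 : 1 ≤ t := by
            rcases Nat.eq_zero_or_pos t with h | h
            · subst h
              have hsp := pvFaT_spec_some hf
              simp only [Nat.add_zero] at hsp
              exact absurd hsp (by simpa using hz)
            · exact h
          omega
      · rw [if_neg hc]
        have hrec := ih (idx + 1) (cnt + 1)
          (by
            cases hf1 : pvFaT food (idx + 1) with
            | some t' =>
              rw [hskip, hf1] at hinv
              simp at hinv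
              exact ⟨by omega, by omega⟩
            | none =>
              rw [hskip, hf1] at hinv
              simp at hinv
              exact ⟨by omega, by omega⟩)
        rw [hrec]
        rw [hskip]
        cases hf1 : pvFaT food (idx + 1) with
        | none => simp
        | some t' =>
          simp only [Option.map_some]
          have he : idx + 1 + t' = idx + (t' + 1) := by omega
          rw [he]
    · rw [if_neg hz]
      have hfa : pvFaT food idx = some 0 :=
        pvFaT_active (by omega) hz
      rw [hfa]
      simp

-- ML: A's first loop (with enough fuel) equals the reference process
theorem pvML (n : Nat) : ∀ (fuel : Nat) (food : List Int) (k : Int) (idx cnt : Nat),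
    n = food.length → 0 < n → idx ≤ n →
    (match pvFaT food (idx % n) with
     | some t => cnt + t < n
     | none => cnt < n) →
    k.toNat * (n + 1) + (n - cnt) + 1 ≤ fuel →
    pvLoop1 n fuel food k idx cnt = pvRef k.toNat food (idx % n) := by
  intro fuel
  induction fuel generalizing n with
  | zero =>
    intro food k idx cnt hn h0 hidx hinv hfuel
    omega
  | succ fuel ih =>
    intro food k idx cnt hn h0 hidx hinv hfuel
    subst hn
    simp only [pvLoop1]
    have hcnt_lt : cnt < food.length := by
      cases hf : pvFaT food (idx % food.length) with
      | some t => rw [hf] at hinv; omega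
      | none => rw [hf] at hinv; omega
    by_cases hk : 0 < k
    · rw [if_pos hk]
      have hidx1 : (if idx = food.length then idx % food.length else idx) = idx % food.length := by
        split
        · rfl
        · exact (Nat.mod_eq_of_lt (by omega)).symm
      rw [hidx1]
      have hmm : idx % food.length % food.length = idx % food.length := Nat.mod_mod_of_dvd idx (dvd_refl food.length)
      by_cases hv : food.getD (idx % food.length) 0 = 0
      · rw [if_pos hv]
        have hskip : pvFaT food (idx % food.length)
            = (pvFaT food (idx % food.length + 1)).map (· + 1) :=
          pvFaT_skip h0 (by rwa [hmm])
        by_cases hc : cnt + 1 = food.length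
        · rw [if_pos hc]
          cases hf : pvFaT food (idx % food.length) with
          | some t =>
            rw [hf] at hinv
            have ht1 : 1 ≤ t := by
              rcases Nat.eq_zero_or_pos t with h | h
              · subst h
                have hsp := pvFaT_spec_some hf
                simp only [Nat.add_zero] at hsp
                rw [hmm] at hsp
                exact absurd hv hsp
              · exact h
            omega
          | none =>
            cases hkn : k.toNat <;> simp [pvRef, hf]
        · rw [if_neg hc]
          have hinv' :
              (match pvFaT food ((idx % food.length + 1) % food.length) with
               | some t => (cnt + 1) + t < food.length
               | none => cnt + 1 < food.length) := by
            rw [← pvFaT_mod]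
            cases hf1 : pvFaT food (idx % food.length + 1) with
            | some t' =>
              rw [hskip, hf1] at hinv
              simp only [Option.map_some] at hinv
              omega
            | none =>
              omega
          have hrec := ih food.length food k (idx % food.length + 1) (cnt + 1)
            rfl h0 (by have := Nat.mod_lt idx h0; omega) hinv' (by omega)
          rw [hrec]
          rw [← pvRef_mod]
          exact pvRef_skip k.toNat h0 (by rwa [hmm])
      · rw [if_neg hv]
        have hfa : pvFaT food (idx % food.length) = some 0 :=
          pvFaT_active h0 (by rwa [hmm])
        have hksucc : k.toNat = (k - 1).toNat + 1 := by omega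
        rw [hksucc]
        simp only [pvRef, hfa, Nat.add_zero]
        rw [hmm]
        have hlenset : (food.set (idx % food.length) (food.getD (idx % food.length) 0 - 1)).length
            = food.length := by simp
        have hinv2 :
            (match pvFaT (food.set (idx % food.length) (food.getD (idx % food.length) 0 - 1))
                ((idx % food.length + 1) % food.length) with
             | some t => 0 + t < food.length
             | none => (0 : Nat) < food.length) := by
          cases hf2 : pvFaT (food.set (idx % food.length) (food.getD (idx % food.length) 0 - 1))
              ((idx % food.length + 1) % food.length) with
          | some t =>
            have := pvFaT_lt hf2
            rw [hlenset] at this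
            omega
          | none => omega
        have hrec := ih food.length
          (food.set (idx % food.length) (food.getD (idx % food.length) 0 - 1))
          (k - 1) (idx % food.length + 1) 0
          hlenset.symm h0 (by have := Nat.mod_lt idx h0; omega) hinv2
          (by
            have hmul : k.toNat * (food.length + 1)
                = (k - 1).toNat * (food.length + 1) + (food.length + 1) := by
              rw [hksucc]; ring
            omega)
        rw [hrec]
        have hmod2 := pvRef_mod (k - 1).toNat
          (food.set (idx % food.length) (food.getD (idx % food.length) 0 - 1))
          (idx % food.length + 1)
        rw [hlenset] at hmod2
        exact hmod2.symm
    · rw [if_neg hk]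
      have hk0 : k.toNat = 0 := by omega
      rw [hk0]
      have hL2 := pvL2 food food.length rfl h0 food.length idx cnt
        (by
          rw [pvFaT_mod]
          cases hf : pvFaT food (idx % food.length) with
          | some t =>
            rw [hf] at hinv
            have := pvFaT_lt hf
            exact ⟨by omega, by omega⟩
          | none =>
            rw [hf] at hinv
            exact ⟨by omega, by omega⟩)
      rw [hL2]
      rw [pvFaT_mod food idx]
      simp only [pvRef]
      cases hf : pvFaT food (idx % food.length) with
      | none => rfl
      | some t => simp [Nat.mod_add_mod]


-- ===== VERDICT (by name: the statement is the Claim_ definition above) =====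
theorem solution_spec : Claim_equal_solution := by
  intro food k _dom hpre
  unfold Spec_solution solution solution_alt
  have h0 : 0 < food.length := List.length_pos_iff.mpr hpre
  have hk' : ((if k < 0 then 0 else k) : Int).toNat = k.toNat := by split <;> omega
  have hA := pvML food.length (k.toNat * (food.length + 1) + food.length + 1) food k 0 0 rfl h0
    (by omega)
    (by cases h : pvFaT food (0 % food.length) with
        | none => exact h0
        | some t => simpa using pvFaT_lt h)
    (by omega)
  rw [Nat.zero_mod] at hA
  have hB := pvBM (k.toNat + 1) food (if k < 0 then 0 else k)
    (by rw [hk']; omega) (by split <;> omega) h0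
  rw [hk'] at hB
  show pvLoop1 food.length (k.toNat * (food.length + 1) + food.length + 1) food k 0 0
      = pvBLoop food (if k < 0 then 0 else k)
  rw [hA, hB]
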